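-- pv_equiv track=rewrite | github.com/karel-brinda/rnftools | rnftools/lavender/Bam.py | _et_line
-- ===== SOURCE A (Python) =====
-- def _et_line(readname,vector_of_categories):
-- 	i=0
-- 	intervals=[]
-- 	for j in range(len(vector_of_categories)):
-- 		if vector_of_categories[i]!=vector_of_categories[j]:
-- 			intervals.append("{}:{}-{}".format(vector_of_categories[i],i,j-1))
-- 			i=j
-- 	intervals.append("{}:{}-{}".format(vector_of_categories[i],i,len(vector_of_categories)-1))
--
-- 	return "{}\t{}".format(readname,",".join(intervals))
-- ===== SOURCE B (Python) =====
-- def _et_line(readname, vector_of_categories):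
--     def go(rest, start):
--         head = rest[0]
--         k = 1
--         while k < len(rest) and rest[k] == head:
--             k += 1
--         seg = "{}:{}-{}".format(head, start, start + k - 1)
--         if k == len(rest):
--             return [seg]
--         return [seg] + go(rest[k:], start + k)
--     return "{}\t{}".format(readname, ",".join(go(vector_of_categories, 0)))
-- ===== Notes on version B (the rewrite author's own statement) =====
-- stated objective: alternative
-- what changed: Replaces A's single index loop over range(len(v)) with a mutable running-start accumulator by a recursive helper that consumes the list run by run: it counts the length of the leading run with a while loop, emits that interval, and recurses on the remaining suffix with an updated offset.
import Mathlib
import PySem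

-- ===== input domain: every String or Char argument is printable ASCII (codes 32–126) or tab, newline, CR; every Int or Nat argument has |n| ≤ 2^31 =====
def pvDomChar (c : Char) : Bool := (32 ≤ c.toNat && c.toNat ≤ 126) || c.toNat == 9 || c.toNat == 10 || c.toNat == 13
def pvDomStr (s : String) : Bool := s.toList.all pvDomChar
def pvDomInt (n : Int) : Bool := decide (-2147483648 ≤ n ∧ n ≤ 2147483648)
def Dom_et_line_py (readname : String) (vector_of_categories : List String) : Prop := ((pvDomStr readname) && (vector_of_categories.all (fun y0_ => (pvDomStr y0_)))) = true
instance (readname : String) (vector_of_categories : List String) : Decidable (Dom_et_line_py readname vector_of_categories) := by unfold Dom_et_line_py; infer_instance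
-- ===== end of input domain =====

-- B replaces A's index loop with a running-start accumulator by a recursive helper that
-- consumes the list run by run (alternative decomposition, same O(n) cost).

-- ===== PORT A =====
-- "{}:{}-{}".format(v[a], a, b) as A writes it (indices in range under the loop)
def pvFmtA (v : List String) (a b : Int) : String :=
  PySem.List.pyGetD v a "" ++ ":" ++ PySem.Int.toStr a ++ "-" ++ PySem.Int.toStr b

def pvStep (v : List String) (st : Int × List String) (j : Int) : Int × List String :=
  if PySem.List.pyGetD v st.1 "" ≠ PySem.List.pyGetD v j "" then
    (j, st.2 ++ [pvFmtA v st.1 (j - 1)])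
  else st

def et_line_py (readname : String) (vector_of_categories : List String) : String :=
  let st := (PySem.List.pyRange 0 (vector_of_categories.length : Int) 1).foldl
    (pvStep vector_of_categories) ((0 : Int), ([] : List String))
  let intervals := st.2 ++ [pvFmtA vector_of_categories st.1 ((vector_of_categories.length : Int) - 1)]
  readname ++ "\t" ++ PySem.Str.join "," intervals

-- ===== PORT B =====
-- the while loop 'k = 1; while k < len(rest) and rest[k] == head: k += 1' counts the
-- leading elements of the tail equal to head; rest[k:] with 0 ≤ k is List.drop
def pvRun (h : String) (t : List String) : Nat :=
  match t with
  | [] => 0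
  | x :: t' => if x == h then pvRun h t' + 1 else 0

def pvGo : List String → Int → List String
  | [], _ => []   -- Python B raises IndexError here (rest[0]); unreachable under Pre_
  | h :: t, start =>
      let k : Nat := 1 + pvRun h t
      let seg := h ++ ":" ++ PySem.Int.toStr start ++ "-" ++ PySem.Int.toStr (start + (k : Int) - 1)
      if k = (h :: t).length then [seg]
      else seg :: pvGo ((h :: t).drop k) (start + (k : Int))
termination_by rest _ => rest.length
decreasing_by simp

def et_line_py_alt (readname : String) (vector_of_categories : List String) : String :=
  readname ++ "\t" ++ PySem.Str.join "," (pvGo vector_of_categories 0)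

-- ===== PRECONDITION & SPEC =====
-- Python A raises IndexError on the empty vector (the final v[i] access); B raises there too.
def Pre_et_line_py (readname : String) (vector_of_categories : List String) : Prop :=
  vector_of_categories.isEmpty = false
instance (readname : String) (vector_of_categories : List String) : Decidable (Pre_et_line_py readname vector_of_categories) := by unfold Pre_et_line_py; infer_instance
def pvWitness_et_line_py : String × List String := ("read1", ["a", "a", "b"])

def Spec_et_line_py (readname : String) (vector_of_categories : List String) (out : String) : Prop := out = et_line_py_alt readname vector_of_categories
instance (readname : String) (vector_of_categories : List String) (out : String) : Decidable (Spec_et_line_py readname vector_of_categories out) := by unfold Spec_et_line_py; infer_instance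

-- ===== CLAIM (what is proved, stated in full; the proofs are below) =====
def Claim_equal_et_line_py : Prop := ∀ (readname : String) (vector_of_categories : List String), Dom_et_line_py readname vector_of_categories → Pre_et_line_py readname vector_of_categories → Spec_et_line_py readname vector_of_categories (et_line_py readname vector_of_categories)

-- ===== LEMMAS AND PROOFS =====

-- every element of the run is the head
lemma pvRun_mem (h : String) (t : List String) :
    ∀ m, m < pvRun h t → t[m]? = some h := by
  induction t with
  | nil => intro m hm; simp [pvRun] at hm
  | cons x t' ih =>
    intro m hm
    simp only [pvRun] at hm
    by_cases hx : x == h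
    · simp only [hx, if_true] at hm
      cases m with
      | zero => simpa using (eq_of_beq hx)
      | succ m' => simpa using ih m' (by omega)
    · simp [hx] at hm
  
-- the element right after the run (if any) differs from the head
lemma pvRun_stop (h : String) (t : List String) (hlt : pvRun h t < t.length) :
    ∃ x, t[pvRun h t]? = some x ∧ x ≠ h := by
  induction t with
  | nil => simp at hlt
  | cons x t' ih =>
    by_cases hx : x == h
    · simp only [pvRun, hx, if_true] at hlt ⊢
      obtain ⟨y, hy, hne⟩ := ih (by simpa using hlt)
      exact ⟨y, by simpa using hy, hne⟩
    · refine ⟨x, ?_, by simpa using hx⟩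
      simp [pvRun, hx]

lemma pvRun_le (h : String) (t : List String) : pvRun h t ≤ t.length := by
  induction t with
  | nil => simp [pvRun]
  | cons x t' ih =>
    simp only [pvRun, List.length_cons]
    split
    · omega
    · omega

-- A's loop is a no-op across a constant chunk
lemma pvNoop (v : List String) (i : Int) (acc : List String) :
    ∀ k : Nat, (∀ j : Int, i ≤ j → j < i + k → PySem.List.pyGetD v j "" = PySem.List.pyGetD v i "") →
      (PySem.List.pyRange i (i + (k : Int)) 1).foldl (pvStep v) (i, acc) = (i, acc) := by
  intro k
  induction k with
  | zero => intro _; simp [PySem.List.pyRange_one_eq_nil]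
  | succ k' ih =>
    intro hconst
    have hsplit : PySem.List.pyRange i (i + ((k' + 1 : Nat) : Int)) 1
        = PySem.List.pyRange i (i + (k' : Int)) 1 ++ [i + (k' : Int)] := by
      have : i + ((k' + 1 : Nat) : Int) = (i + (k' : Int)) + 1 := by push_cast; ring
      rw [this, PySem.List.pyRange_one_succ_right (by omega)]
    rw [hsplit, List.foldl_append, ih (fun j h1 h2 => hconst j h1 (by push_cast at h2 ⊢; omega))]
    have : PySem.List.pyGetD v (i + (k' : Int)) "" = PySem.List.pyGetD v i "" :=
      hconst _ (by omega) (by push_cast; omega)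
    simp [pvStep, this]

-- main invariant: from state (i, acc), A's remaining loop plus the final append produce
-- acc ++ B's recursive run decomposition of the suffix v.drop i
lemma pvKey (v : List String) :
    ∀ (fuel : Nat) (rest : List String) (i : Nat) (acc : List String),
      rest.length ≤ fuel → v.drop i = rest → rest ≠ [] →
      (let st := (PySem.List.pyRange (i : Int) (v.length : Int) 1).foldl (pvStep v) ((i : Int), acc);
       st.2 ++ [pvFmtA v st.1 ((v.length : Int) - 1)]) = acc ++ pvGo rest (i : Int) := by
  intro fuel
  induction fuel with
  | zero =>
    intro rest i acc hfuel hdrop hne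
    cases rest with
    | nil => exact absurd rfl hne
    | cons h t => simp at hfuel
  | succ fuel ih =>
    intro rest i acc hfuel hdrop hne
    cases rest with
    | nil => exact absurd rfl hne
    | cons h t =>
      have hlen : v.length = i + t.length + 1 := by
        have := congrArg List.length hdrop
        simp [List.length_drop] at this
        omega
      set r := pvRun h t with hr
      set k : Nat := 1 + r with hk
      have hrle : r ≤ t.length := pvRun_le h t
      have hik : i + k ≤ v.length := by omega
      have hidx : ∀ m : Nat, v[i+m]? = (h :: t)[m]? := by
        intro m; rw [← hdrop, List.getElem?_drop]
      have hrunm : ∀ m : Nat, m < k → v[i+m]? = some h := by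
        intro m hm
        rw [hidx]
        cases m with
        | zero => simp
        | succ m' => simpa using pvRun_mem h t m' (by omega)
      have hgetD : ∀ m : Nat, m < k → PySem.List.pyGetD v ((i+m : Nat) : Int) "" = h := by
        intro m hm
        rw [PySem.List.pyGetD_natCast, List.getD_eq_getElem?_getD, hrunm m hm]
        rfl
      have hgeti : PySem.List.pyGetD v (i : Int) "" = h := by
        have := hgetD 0 (by omega)
        simpa using this
      have hconst : ∀ j : Int, (i : Int) ≤ j → j < (i : Int) + (k : Int) →
          PySem.List.pyGetD v j "" = PySem.List.pyGetD v (i : Int) "" := by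
        intro j h1 h2
        obtain ⟨m, rfl⟩ : ∃ m : Nat, j = ((i + m : Nat) : Int) :=
          ⟨(j - (i : Int)).toNat, by push_cast; omega⟩
        have hm : m < k := by push_cast at h2; omega
        rw [hgetD m hm, hgeti]
      have hsplit : PySem.List.pyRange (i : Int) (v.length : Int) 1
          = PySem.List.pyRange (i : Int) ((i : Int) + (k : Int)) 1
            ++ PySem.List.pyRange ((i : Int) + (k : Int)) (v.length : Int) 1 :=
        PySem.List.pyRange_one_append _ _ _ (by omega) (by omega)
      simp only
      rw [hsplit, List.foldl_append, pvNoop v (i : Int) acc k hconst]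
      by_cases hend : i + k = v.length
      · -- the run reaches the end of the vector
        rw [PySem.List.pyRange_one_eq_nil (by omega)]
        have hklen : k = (h :: t).length := by simp; omega
        rw [pvGo, if_pos hklen]
        simp only [List.foldl_nil, pvFmtA, hgeti]
        have harg : ((v.length : Int) - 1) = (i : Int) + ((k : Nat) : Int) - 1 := by
          omega
        rw [harg]
      · -- a later element differs: the loop emits the interval and continues there
        have hklt : i + k < v.length := by omega
        have hrlt : r < t.length := by omega
        obtain ⟨x, hx, hxne⟩ := pvRun_stop h t hrlt
        have hafter : PySem.List.pyGetD v ((i + k : Nat) : Int) "" = x := by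
          rw [PySem.List.pyGetD_natCast, List.getD_eq_getElem?_getD, hidx k]
          rw [hk, Nat.add_comm 1 r]
          simpa using congrArg (fun o => o.getD "") hx
        have hcast : ((i + k : Nat) : Int) = (i : Int) + (k : Int) := by push_cast; ring
        rw [PySem.List.pyRange_one_cons (by omega), List.foldl_cons]
        have hstep1 : pvStep v ((i : Int), acc) ((i : Int) + (k : Int))
            = ((i : Int) + (k : Int), acc ++ [pvFmtA v (i : Int) ((i : Int) + (k : Int) - 1)]) := by
          have hne' : PySem.List.pyGetD v (i : Int) "" ≠ PySem.List.pyGetD v ((i : Int) + (k : Int)) "" := by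
            rw [hgeti, ← hcast, hafter]
            exact fun e => hxne e.symm
          unfold pvStep
          split
          · rfl
          · rename_i hcontr; exact absurd hne' hcontr
        rw [hstep1]
        -- the next suffix of v
        have hdrop' : v.drop (i + k) = t.drop r := by
          rw [← List.drop_drop, hdrop, hk, Nat.add_comm 1 r]
          simp
        have hne' : t.drop r ≠ [] := by
          apply List.ne_nil_of_length_pos
          simp [List.length_drop]; omega
        have hfuel' : (t.drop r).length ≤ fuel := by
          simp only [List.length_drop]
          simp at hfuel
          omega
        have ihres := ih (t.drop r) (i + k) (acc ++ [pvFmtA v (i : Int) ((i : Int) + (k : Int) - 1)])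
          hfuel' hdrop' hne'
        simp only at ihres
        -- the first iteration at j = i + k is a no-op from state (i + k, _)
        rw [PySem.List.pyRange_one_cons (by push_cast; omega), List.foldl_cons] at ihres
        have hstep2 : ∀ acc2 : List String,
            pvStep v (((i + k : Nat) : Int), acc2) ((i + k : Nat) : Int) = (((i + k : Nat) : Int), acc2) := by
          intro acc2; simp [pvStep]
        rw [hstep2] at ihres
        rw [hcast] at ihres
        rw [ihres]
        -- unfold B one step
        rw [pvGo]
        rw [← hr, ← hk]
        have hklen : ¬ (k = (h :: t).length) := by simp; omega
        rw [if_neg hklen]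
        have hdropk : (h :: t).drop k = t.drop r := by
          rw [hk, Nat.add_comm 1 r]; simp
        rw [hdropk]
        simp only [pvFmtA, hgeti]
        rw [← List.append_cons]

-- ===== VERDICT (by name: the statement is the Claim_ definition above) =====
theorem et_line_py_spec : Claim_equal_et_line_py := by
  intro readname v _ hpre
  have hne : v ≠ [] := by
    cases v with
    | nil => simp [Pre_et_line_py] at hpre
    | cons a t => simp
  unfold Spec_et_line_py et_line_py et_line_py_alt
  have h := pvKey v v.length v 0 [] (le_refl _) (by simp) hne
  simp only [Nat.cast_zero, List.nil_append] at h
  exact congrArg (fun l => readname ++ "\t" ++ PySem.Str.join "," l) h
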